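-- pv_equiv track=rewrite | github.com/muhammadazizbeck/Leetcode-Solutions | Data Structures/Array/(EX2110)Number-Of-Smooth-Descent-Periods-Of-A-Stock.py | getDescentPeriods
-- ===== SOURCE A (Python) =====
-- from typing import List
--
-- def getDescentPeriods(prices: List[int]) -> int:
--     result = 0
--     length = 0
--
--     for i in range(len(prices)):
--         if i > 0 and prices[i] == prices[i - 1] - 1:
--             length += 1
--         else:
--             length = 1
--
--         result += length
--
--     return result
-- ===== SOURCE B (Python) =====
-- def _tri(k):
--     return k * (k + 1) // 2
--
-- def getDescentPeriods(prices):
--     n = len(prices)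
--     cuts = [0] + [i for i in range(1, n) if prices[i] != prices[i - 1] - 1] + [n]
--     return sum(_tri(b - a) for a, b in zip(cuts, cuts[1:]))
-- ===== Notes on version B (the rewrite author's own statement) =====
-- stated objective: alternative
-- what changed: B works in staged passes: it first materialises the list of run-boundary (cut) indices with a comprehension, then sums the closed-form count (b-a)*(b-a+1)//2 over consecutive cut pairs, instead of A's single pass that maintains a running descent length and adds it at every index.
import Mathlib
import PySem

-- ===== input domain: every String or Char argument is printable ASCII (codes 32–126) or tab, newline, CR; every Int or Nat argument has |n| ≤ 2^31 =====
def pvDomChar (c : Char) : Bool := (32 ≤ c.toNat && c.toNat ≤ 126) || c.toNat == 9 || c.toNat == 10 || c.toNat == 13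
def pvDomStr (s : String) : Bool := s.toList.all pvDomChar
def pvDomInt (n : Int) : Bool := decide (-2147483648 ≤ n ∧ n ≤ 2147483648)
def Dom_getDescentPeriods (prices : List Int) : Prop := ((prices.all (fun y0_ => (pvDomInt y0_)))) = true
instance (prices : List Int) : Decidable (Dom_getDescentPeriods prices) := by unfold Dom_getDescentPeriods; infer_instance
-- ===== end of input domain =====

-- B computes the list of run-boundary (cut) indices in one pass, then sums the closed-form
-- count (b-a)*(b-a+1)//2 over consecutive cut pairs (objective: alternative decomposition).

-- ===== PORT A =====
-- literal transliteration of A: foldl over range(len(prices)) with state (result, length)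
def getDescentPeriods (prices : List Int) : Int :=
  ((PySem.List.pyRange 0 (prices.length : Int) 1).foldl
    (fun (st : Int × Int) i =>
      let length : Int :=
        if 0 < i ∧ PySem.List.pyGetD prices i 0 = PySem.List.pyGetD prices (i - 1) 0 - 1
        then st.2 + 1 else 1
      (st.1 + length, length))
    (0, 0)).1

-- ===== PORT B =====
-- Source B's helper _tri: k * (k + 1) // 2
def pvTri (k : Int) : Int := PySem.Int.floordiv (k * (k + 1)) 2

-- Source B: cuts = [0] + [i for i in range(1, n) if prices[i] != prices[i-1]-1] + [n];
--       sum(_tri(b - a) for a, b in zip(cuts, cuts[1:]))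
def getDescentPeriods_alt (prices : List Int) : Int :=
  let n : Int := (prices.length : Int)
  let cuts : List Int :=
    0 :: ((PySem.List.pyRange 1 n 1).filter
      (fun i => decide (PySem.List.pyGetD prices i 0 ≠ PySem.List.pyGetD prices (i - 1) 0 - 1)))
      ++ [n]
  ((cuts.zip cuts.tail).map (fun ab => pvTri (ab.2 - ab.1))).sum

-- ===== PRECONDITION & SPEC =====
def Spec_getDescentPeriods (prices : List Int) (out : Int) : Prop := out = getDescentPeriods_alt prices
instance (prices : List Int) (out : Int) : Decidable (Spec_getDescentPeriods prices out) := by unfold Spec_getDescentPeriods; infer_instance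

-- ===== CLAIM (what is proved, stated in full; the proofs are below) =====
def Claim_equal_getDescentPeriods : Prop := ∀ (prices : List Int), Dom_getDescentPeriods prices → Spec_getDescentPeriods prices (getDescentPeriods prices)

-- ===== LEMMAS AND PROOFS =====

-- proof-only intermediate: a run-accumulating recursion both ports are related to
def pvAltGo (total run : Int) (prev : Option Int) : List Int → Int
  | [] => total + pvTri run
  | p :: rest =>
    match prev with
    | some q =>
      if p = q - 1 then pvAltGo total (run + 1) (some p) rest
      else pvAltGo (total + pvTri run) 1 (some p) rest
    | none => pvAltGo (total + pvTri run) 1 (some p) rest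

-- proof-only: triangular sum over consecutive cut pairs
def pvSumPairs (c : Int) : List Int → Int
  | [] => 0
  | d :: t => pvTri (d - c) + pvSumPairs d t

lemma pvTri_succ (x : Int) : pvTri (x + 1) = pvTri x + (x + 1) := by
  obtain ⟨m, hm⟩ := Int.even_mul_succ_self x
  have h1 : x * (x + 1) = 2 * m := by omega
  have h2 : (x + 1) * ((x + 1) + 1) = 2 * (m + x + 1) := by linear_combination h1
  simp only [pvTri, h1, h2, PySem.Int.floordiv_eq_ediv_of_pos (by norm_num : (0:Int) < 2)]
  omega

lemma pvTri_one : pvTri 1 = 1 := by decide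

lemma pv_zipsum (cs : List Int) : ∀ (c : Int),
    (((c :: cs).zip cs).map (fun ab => pvTri (ab.2 - ab.1))).sum = pvSumPairs c cs := by
  induction cs with
  | nil => intro c; simp [pvSumPairs]
  | cons d t ih => intro c; simp [pvSumPairs, ih d]

-- A's fold over range(k,n) equals pvAltGo on the suffix
lemma pv_main (prices : List Int) : ∀ (m k : Nat), k + m = prices.length →
    ∀ (result length : Int),
    ((PySem.List.pyRange (k : Int) (prices.length : Int) 1).foldl
      (fun (st : Int × Int) i =>
        let length : Int :=
          if 0 < i ∧ PySem.List.pyGetD prices i 0 = PySem.List.pyGetD prices (i - 1) 0 - 1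
          then st.2 + 1 else 1
        (st.1 + length, length))
      (result, length)).1
    = pvAltGo (result - pvTri length) length
        (if k = 0 then none else some (PySem.List.pyGetD prices ((k : Int) - 1) 0))
        (prices.drop k) := by
  intro m
  induction m with
  | zero =>
    intro k hk result length
    rw [PySem.List.pyRange_one_eq_nil (by omega),
        List.drop_eq_nil_of_le (by omega : prices.length ≤ k)]
    simp only [List.foldl_nil, pvAltGo]
    ring
  | succ m ih =>
    intro k hk result length
    have hklt : k < prices.length := by omega
    have hgk : PySem.List.pyGetD prices (k : Int) 0 = prices[k] := by
      rw [PySem.List.pyGetD_natCast]; exact List.getD_eq_getElem _ _ hklt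
    rw [PySem.List.pyRange_one_cons (by exact_mod_cast hklt)]
    simp only [List.foldl_cons]
    have hsucc : ((k : Int) + 1) = ((k + 1 : Nat) : Int) := by push_cast; ring
    rw [hsucc, ih (k + 1) (by omega), if_neg (by omega : ¬ (k + 1 = 0))]
    have hcast : ((k + 1 : Nat) : Int) - 1 = (k : Int) := by push_cast; ring
    rw [hcast, hgk, List.drop_eq_getElem_cons hklt]
    by_cases h0 : k = 0
    · subst h0
      rw [if_pos rfl,
          if_neg (fun h => absurd h.1 (by norm_num) :
            ¬ (0 < ((0 : Nat) : Int) ∧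
               prices[0] = PySem.List.pyGetD prices (((0 : Nat) : Int) - 1) 0 - 1))]
      simp only [pvAltGo]
      congr 1
      rw [pvTri_one]; ring
    · rw [if_neg h0]
      simp only [pvAltGo]
      by_cases hc : prices[k] = PySem.List.pyGetD prices ((k : Int) - 1) 0 - 1
      · rw [if_pos hc,
            if_pos (⟨by exact_mod_cast Nat.pos_of_ne_zero h0, hc⟩ :
              0 < (k : Int) ∧ prices[k] = PySem.List.pyGetD prices ((k : Int) - 1) 0 - 1)]
        congr 1
        rw [pvTri_succ]; ring
      · rw [if_neg hc, if_neg (fun h => hc h.2)]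
        congr 1
        rw [pvTri_one]; ring

-- pvAltGo on the suffix from k equals the cut-pair sum over the remaining cut indices
lemma pv_runs (prices : List Int) : ∀ (m k : Nat), k + m = prices.length → 0 < k →
    ∀ (total a : Int),
    pvAltGo total ((k : Int) - a) (some (PySem.List.pyGetD prices ((k : Int) - 1) 0))
        (prices.drop k)
    = total + pvSumPairs a
        (((PySem.List.pyRange (k : Int) (prices.length : Int) 1).filter
            (fun i => decide (PySem.List.pyGetD prices i 0 ≠ PySem.List.pyGetD prices (i - 1) 0 - 1)))
          ++ [(prices.length : Int)]) := by
  intro m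
  induction m with
  | zero =>
    intro k hk _ total a
    rw [PySem.List.pyRange_one_eq_nil (by omega),
        List.drop_eq_nil_of_le (by omega : prices.length ≤ k)]
    simp only [List.filter_nil, List.nil_append, pvAltGo, pvSumPairs]
    have : (prices.length : Int) = (k : Int) := by omega
    rw [this]; ring
  | succ m ih =>
    intro k hk hkpos total a
    have hklt : k < prices.length := by omega
    have hgk : PySem.List.pyGetD prices (k : Int) 0 = prices[k] := by
      rw [PySem.List.pyGetD_natCast]; exact List.getD_eq_getElem _ _ hklt
    rw [List.drop_eq_getElem_cons hklt,
        PySem.List.pyRange_one_cons (by exact_mod_cast hklt)]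
    have hsucc : ((k : Int) + 1) = ((k + 1 : Nat) : Int) := by push_cast; ring
    have hcast : ((k + 1 : Nat) : Int) - 1 = (k : Int) := by push_cast; ring
    simp only [pvAltGo, List.filter_cons]
    by_cases hc : prices[k] = PySem.List.pyGetD prices ((k : Int) - 1) 0 - 1
    · rw [if_pos hc]
      have hfilt : (decide (PySem.List.pyGetD prices (k : Int) 0 ≠
          PySem.List.pyGetD prices ((k : Int) - 1) 0 - 1)) = false := by
        simp [hgk, hc]
      rw [hfilt]
      simp only [Bool.false_eq_true, if_false]
      have hrun : (k : Int) - a + 1 = ((k + 1 : Nat) : Int) - a := by push_cast; ring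
      have hprev : prices[k] = PySem.List.pyGetD prices (((k + 1 : Nat) : Int) - 1) 0 := by
        rw [hcast, hgk]
      rw [hrun, hprev, hsucc, ih (k + 1) (by omega) (by omega) total a]
    · rw [if_neg hc]
      have hfilt : (decide (PySem.List.pyGetD prices (k : Int) 0 ≠
          PySem.List.pyGetD prices ((k : Int) - 1) 0 - 1)) = true := by
        simp [hgk, hc]
      rw [hfilt]
      simp only [if_true, List.cons_append, pvSumPairs]
      have ihh := ih (k + 1) (by omega) (by omega) (total + pvTri ((k : Int) - a)) (k : Int)
      have hone : ((k + 1 : Nat) : Int) - (k : Int) = 1 := by push_cast; ring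
      rw [hcast, hgk, hone, ← hsucc] at ihh
      rw [ihh]
      ring

-- ===== VERDICT (by name: the statement is the Claim_ definition above) =====
theorem getDescentPeriods_spec : Claim_equal_getDescentPeriods := by
  intro prices _
  unfold Spec_getDescentPeriods
  cases prices with
  | nil => decide
  | cons p rest =>
    have hA := pv_main (p :: rest) (p :: rest).length 0 (by omega) 0 0
    unfold getDescentPeriods
    rw [Nat.cast_zero] at hA
    rw [hA]
    simp only [reduceIte, List.drop_zero, pvAltGo]
    have hrn := pv_runs (p :: rest) rest.length 1 (by simp; omega) (by norm_num)
        (0 - pvTri 0 + pvTri 0) 0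
    have hg : PySem.List.pyGetD (p :: rest) (((1 : Nat) : Int) - 1) 0 = p := by
      rw [show (((1 : Nat) : Int) - 1) = ((0 : Nat) : Int) by norm_num,
          PySem.List.pyGetD_natCast]
      rfl
    rw [hg, show (((1 : Nat) : Int) - 0) = 1 by norm_num,
        show List.drop 1 (p :: rest) = rest from rfl, Nat.cast_one] at hrn
    rw [hrn]
    unfold getDescentPeriods_alt
    simp only [List.cons_append, List.tail_cons]
    rw [pv_zipsum]
    have ht0 : pvTri 0 = 0 := by decide
    rw [ht0]
    push_cast
    ring
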